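-- pv_equiv track=rewrite | github.com/RaghavgitGrover/XV6_Part2_and_Concurrency | concurrency/Distributed-Sorting/test.py | is_sorted_by_name
-- ===== SOURCE A (Python) =====
-- def is_sorted_by_name(output_lines):
--     """Check if output is sorted by name."""
--     prev_name = ""
--     for line in output_lines:
--         parts = line.strip().split()
--         if len(parts) < 1:
--             continue
--         curr_name = parts[0]
--         if curr_name < prev_name and prev_name != "":
--             return False
--         prev_name = curr_name
--     return True
-- ===== SOURCE B (Python) =====
-- def is_sorted_by_name(output_lines):
--     """Check if output is sorted by name."""
--     names = [line.strip().split()[0] for line in output_lines if line.strip().split()]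
--     return names == sorted(names)
-- ===== Notes on version B (the rewrite author's own statement) =====
-- stated objective: idiomatic
-- what changed: Replaces A's fused scan with a prev-name accumulator and early return by extracting the first token of each non-blank line into a list and comparing it against its sorted copy.
import Mathlib
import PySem

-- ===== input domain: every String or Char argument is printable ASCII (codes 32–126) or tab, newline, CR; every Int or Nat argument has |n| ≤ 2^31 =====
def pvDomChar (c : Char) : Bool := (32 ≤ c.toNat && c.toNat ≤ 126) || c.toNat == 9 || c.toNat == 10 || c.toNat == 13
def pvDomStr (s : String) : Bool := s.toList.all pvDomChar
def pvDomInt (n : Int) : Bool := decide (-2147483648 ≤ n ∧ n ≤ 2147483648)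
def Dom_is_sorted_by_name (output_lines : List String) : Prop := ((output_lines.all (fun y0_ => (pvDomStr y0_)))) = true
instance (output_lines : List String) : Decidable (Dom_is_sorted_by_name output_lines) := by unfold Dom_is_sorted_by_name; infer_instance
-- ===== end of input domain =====

-- B replaces A's fused scan (prev-name accumulator with early return) by extracting the
-- first tokens and comparing the list with its sorted copy — more idiomatic, not faster.

-- ===== PORT A =====
-- the for-loop with 'continue' / early 'return False', prev_name threaded as an accumulator
def pvScanA (prev : String) : List String → Bool
  | [] => true
  | line :: rest =>
    match PySem.Str.split₀ (PySem.Str.strip line) with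
    | [] => pvScanA prev rest                                  -- len(parts) < 1: continue
    | curr :: _ =>
      if curr < prev ∧ prev ≠ "" then false                    -- return False
      else pvScanA curr rest                                   -- prev_name = curr_name

def is_sorted_by_name (output_lines : List String) : Bool :=
  pvScanA "" output_lines

-- ===== PORT B =====
-- names = [line.strip().split()[0] for line in output_lines if line.strip().split()]
-- return names == sorted(names)
def is_sorted_by_name_alt (output_lines : List String) : Bool :=
  let names := output_lines.filterMap
    (fun line => (PySem.Str.split₀ (PySem.Str.strip line)).head?)
  names == PySem.List.sorted names (fun x => x) false

-- ===== PRECONDITION & SPEC =====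
def Spec_is_sorted_by_name (output_lines : List String) (out : Bool) : Prop := out = is_sorted_by_name_alt output_lines
instance (output_lines : List String) (out : Bool) : Decidable (Spec_is_sorted_by_name output_lines out) := by unfold Spec_is_sorted_by_name; infer_instance

-- ===== CLAIM (what is proved, stated in full; the proofs are below) =====
def Claim_equal_is_sorted_by_name : Prop := ∀ (output_lines : List String), Dom_is_sorted_by_name output_lines → Spec_is_sorted_by_name output_lines (is_sorted_by_name output_lines)

-- ===== LEMMAS AND PROOFS =====

-- the list of first tokens B extracts
def pvNames (output_lines : List String) : List String :=
  output_lines.filterMap (fun line => (PySem.Str.split₀ (PySem.Str.strip line)).head?)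

theorem pv_empty_le (s : String) : "" ≤ s := by
  rw [String.le_iff_toList_le]
  cases s.toList with
  | nil => exact le_refl _
  | cons a l => exact le_of_lt (List.Lex.nil ..)

-- A's scan succeeds iff the extended name list is an ascending chain
theorem pvScanA_chain (ls : List String) : ∀ prev : String,
    pvScanA prev ls = true ↔ List.IsChain (· ≤ ·) (prev :: pvNames ls) := by
  induction ls with
  | nil =>
    intro prev
    simp [pvScanA, pvNames]
  | cons line rest ih =>
    intro prev
    cases h : PySem.Str.split₀ (PySem.Str.strip line) with
    | nil =>
      have hn : pvNames (line :: rest) = pvNames rest := by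
        simp [pvNames, h]
      rw [hn, show pvScanA prev (line :: rest) = pvScanA prev rest by simp [pvScanA, h]]
      exact ih prev
    | cons curr t =>
      have hn : pvNames (line :: rest) = curr :: pvNames rest := by
        simp [pvNames, h]
      rw [hn]
      by_cases hc : curr < prev ∧ prev ≠ ""
      · have : pvScanA prev (line :: rest) = false := by
          simp [pvScanA, h, hc]
        rw [this]
        constructor
        · intro hcontra; cases hcontra
        · intro hchain
          have hle : prev ≤ curr := (List.isChain_cons_cons.mp hchain).1
          exact absurd hle (not_le_of_gt hc.1)
      · have hstep : pvScanA prev (line :: rest) = pvScanA curr rest := by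
          simp only [pvScanA, h]
          rw [if_neg hc]
        have hle : prev ≤ curr := by
          by_cases hp : prev = ""
          · exact hp ▸ pv_empty_le curr
          · exact le_of_not_gt (fun hlt => hc ⟨hlt, hp⟩)
        rw [hstep, ih curr, List.isChain_cons_cons]
        exact ⟨fun hch => ⟨hle, hch⟩, fun hch => hch.2⟩

theorem pv_chain_empty_head (l : List String) :
    List.IsChain (· ≤ ·) (("" : String) :: l) ↔ List.IsChain (· ≤ ·) l := by
  cases l with
  | nil => simp
  | cons a t =>
    rw [List.isChain_cons_cons]
    exact ⟨fun h => h.2, fun h => ⟨pv_empty_le a, h⟩⟩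

theorem pv_sorted_eq_iff (l : List String) :
    l = PySem.List.sorted l (fun x => x) false ↔ List.Pairwise (· ≤ ·) l := by
  constructor
  · intro h
    have := PySem.List.sorted_pairwise l (fun x => x)
    rw [← h] at this
    exact this
  · intro h
    exact (PySem.List.sorted_eq_self_of_pairwise l (fun x => x) h).symm

-- ===== VERDICT (by name: the statement is the Claim_ definition above) =====
theorem is_sorted_by_name_spec : Claim_equal_is_sorted_by_name := by
  intro ls _
  show is_sorted_by_name ls = is_sorted_by_name_alt ls
  have hA : is_sorted_by_name ls = true ↔ List.Pairwise (· ≤ ·) (pvNames ls) := by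
    rw [show is_sorted_by_name ls = pvScanA "" ls from rfl, pvScanA_chain,
      pv_chain_empty_head, List.isChain_iff_pairwise]
  have hB : is_sorted_by_name_alt ls = true ↔ List.Pairwise (· ≤ ·) (pvNames ls) := by
    rw [show is_sorted_by_name_alt ls
        = (pvNames ls == PySem.List.sorted (pvNames ls) (fun x => x) false) from rfl]
    rw [beq_iff_eq]
    exact pv_sorted_eq_iff (pvNames ls)
  exact Bool.eq_iff_iff.mpr (hA.trans hB.symm)
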